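-- pv_equiv track=rewrite | github.com/zirconsol/drshaq-backend | app/routers/public.py | _etag_matches
-- ===== SOURCE A (Python) =====
-- def _etag_matches(if_none_match: str | None, etag: str) -> bool:
--     if not if_none_match:
--         return False
--     values = [token.strip() for token in if_none_match.split(',')]
--     if '*' in values:
--         return True
--     etag_without_weak = etag.replace('W/', '')
--     return etag in values or etag_without_weak in values
-- ===== SOURCE B (Python) =====
-- def _etag_matches(if_none_match: str | None, etag: str) -> bool:
--     if not if_none_match:
--         return False
--     targets = ('*', etag, etag.replace('W/', ''))
--     buf = ''    # stripped content of the current comma-separated segment so far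
--     pend = ''   # whitespace seen after buf's last non-space char (flushed only if more content follows)
--     for ch in if_none_match:
--         if ch == ',':
--             if buf in targets:
--                 return True
--             buf = ''
--             pend = ''
--         elif ch.isspace():
--             if buf:
--                 pend += ch
--         else:
--             buf += pend + ch
--             pend = ''
--     return buf in targets
-- ===== Notes on version B (the rewrite author's own statement) =====
-- stated objective: alternative
-- what changed: Replaces split-into-a-token-list + per-token strip + three membership scans with a single character-level state machine over the raw header that maintains the stripped content of the current segment in an accumulator (buf/pend) and tests it against the three precomputed targets at each comma and at the end, never calling split or strip.
import Mathlib
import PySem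

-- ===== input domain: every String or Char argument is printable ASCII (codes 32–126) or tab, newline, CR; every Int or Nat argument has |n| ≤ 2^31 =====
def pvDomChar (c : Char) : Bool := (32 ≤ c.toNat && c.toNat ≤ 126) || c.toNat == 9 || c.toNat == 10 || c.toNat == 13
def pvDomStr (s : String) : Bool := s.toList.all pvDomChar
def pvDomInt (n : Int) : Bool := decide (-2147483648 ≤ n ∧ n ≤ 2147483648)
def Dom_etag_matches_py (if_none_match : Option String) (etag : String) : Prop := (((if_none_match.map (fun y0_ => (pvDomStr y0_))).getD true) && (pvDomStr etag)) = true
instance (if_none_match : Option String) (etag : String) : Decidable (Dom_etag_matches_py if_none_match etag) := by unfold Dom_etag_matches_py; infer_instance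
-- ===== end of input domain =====

-- B: a single character-level state machine over the raw header that keeps the stripped content of the
-- current segment in an accumulator and tests it at each comma / at the end — no split, no strip, no token list.

-- ===== PORT A =====
def etag_matches_py (if_none_match : Option String) (etag : String) : Bool :=
  match if_none_match with
  | none => false
  | some s =>
    if s = "" then false
    else
      let values := (((PySem.Str.split? s ",").getD [])).map PySem.Str.strip
      if values.contains "*" then true
      else
        let etag_without_weak := PySem.Str.replace etag "W/" ""
        values.contains etag || values.contains etag_without_weak

-- ===== PORT B =====
-- the for-loop of Source B: state (buf, pend), one step per character of the header
def etagScan (t1 t2 t3 : List Char) : List Char → List Char → List Char → Bool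
  | buf, _, [] => buf == t1 || buf == t2 || buf == t3
  | buf, pend, c :: rest =>
    if c = ',' then
      if buf == t1 || buf == t2 || buf == t3 then true
      else etagScan t1 t2 t3 [] [] rest
    else if PySem.Chars.isspace c then
      if buf.isEmpty then etagScan t1 t2 t3 buf pend rest
      else etagScan t1 t2 t3 buf (pend ++ [c]) rest
    else etagScan t1 t2 t3 (buf ++ pend ++ [c]) [] rest

def etag_matches_py_alt (if_none_match : Option String) (etag : String) : Bool :=
  match if_none_match with
  | none => false
  | some s =>
    if s = "" then false
    else
      etagScan "*".toList etag.toList (PySem.Str.replace etag "W/" "").toList [] [] s.toList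

-- ===== PRECONDITION & SPEC =====
def Spec_etag_matches_py (if_none_match : Option String) (etag : String) (out : Bool) : Prop := out = etag_matches_py_alt if_none_match etag
instance (if_none_match : Option String) (etag : String) (out : Bool) : Decidable (Spec_etag_matches_py if_none_match etag out) := by unfold Spec_etag_matches_py; infer_instance

-- ===== CLAIM (what is proved, stated in full; the proofs are below) =====
def Claim_equal_etag_matches_py : Prop := ∀ (if_none_match : Option String) (etag : String), Dom_etag_matches_py if_none_match etag → Spec_etag_matches_py if_none_match etag (etag_matches_py if_none_match etag)

-- ===== LEMMAS AND PROOFS =====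

-- the comma-separated segments of a char list (proof-side mirror of str.split(','))
def etagTokens : List Char → List (List Char)
  | [] => [[]]
  | c :: rest =>
    if c = ',' then [] :: etagTokens rest
    else (c :: (etagTokens rest).headI) :: (etagTokens rest).tail

-- the buf value after feeding one token through the scan's non-comma rules
def etagConsume : List Char → List Char → List Char → List Char
  | buf, _, [] => buf
  | buf, pend, c :: rest =>
    if PySem.Chars.isspace c then
      if buf.isEmpty then etagConsume buf pend rest
      else etagConsume buf (pend ++ [c]) rest
    else etagConsume (buf ++ pend ++ [c]) [] rest

def etagHit (t1 t2 t3 x : List Char) : Bool := x == t1 || x == t2 || x == t3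

theorem etagTokens_ne_nil (cs : List Char) : etagTokens cs ≠ [] := by
  cases cs with
  | nil => simp [etagTokens]
  | cons c rest => simp only [etagTokens]; split <;> simp

theorem etag_go_spec (fuel : Nat) : ∀ (l cur : List Char) (acc : List (List Char)), l.length < fuel →
    PySem.Chars.splitOn.go [','] fuel l cur acc = acc.reverse ++ (etagTokens l).modifyHead (cur.reverse ++ ·) := by
  induction fuel with
  | zero => intro l cur acc h; omega
  | succ f ih =>
    intro l cur acc h
    cases l with
    | nil => simp [PySem.Chars.splitOn.go, etagTokens]
    | cons c rest =>
      by_cases hc : c = ','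
      · subst hc
        rw [show PySem.Chars.splitOn.go [','] (f+1) (',' :: rest) cur acc
              = PySem.Chars.splitOn.go [','] f rest [] (cur.reverse :: acc) by
            simp [PySem.Chars.splitOn.go, List.isPrefixOf]]
        rw [ih rest [] _ (by simpa using Nat.lt_of_succ_lt_succ h)]
        cases hrest : etagTokens rest <;> simp [etagTokens, hrest]
      · rw [show PySem.Chars.splitOn.go [','] (f+1) (c :: rest) cur acc
              = PySem.Chars.splitOn.go [','] f rest (c :: cur) acc by
            simp only [PySem.Chars.splitOn.go, List.isPrefixOf]
            rw [if_neg (by simp [Ne.symm hc])]]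
        rw [ih rest (c :: cur) _ (by simpa using Nat.lt_of_succ_lt_succ h)]
        obtain ⟨h0, t0, ht⟩ := List.exists_cons_of_ne_nil (etagTokens_ne_nil rest)
        simp [etagTokens, hc, ht]

theorem etag_splitOn_eq_tokens (cs : List Char) : PySem.Chars.splitOn cs [','] = etagTokens cs := by
  rw [PySem.Chars.splitOn, etag_go_spec (cs.length + 1) cs [] [] (by omega)]
  cases h : etagTokens cs <;> simp

theorem etag_rstrip_append_space (x w : List Char) (hw : ∀ c ∈ w, PySem.Chars.isspace c) :
    PySem.Chars.rstrip (x ++ w) = PySem.Chars.rstrip x := by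
  simp only [PySem.Chars.rstrip, List.reverse_append]
  rw [List.dropWhile_append, List.dropWhile_eq_nil_iff.mpr (by simpa using fun c hc => hw c hc)]
  simp

theorem etag_rstrip_append_nonspace (x : List Char) (c : Char) (hc : ¬ PySem.Chars.isspace c) :
    PySem.Chars.rstrip (x ++ [c]) = x ++ [c] := by
  simp [PySem.Chars.rstrip, hc]

theorem etagConsume_rstrip (cs : List Char) : ∀ (buf pend : List Char),
    (∀ c ∈ pend, PySem.Chars.isspace c) → PySem.Chars.rstrip buf = buf → buf ≠ [] →
    etagConsume buf pend cs = PySem.Chars.rstrip (buf ++ pend ++ cs) := by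
  induction cs with
  | nil =>
    intro buf pend hp hb hne
    simp only [etagConsume, List.append_nil]
    rw [etag_rstrip_append_space buf pend hp, hb]
  | cons c rest ih =>
    intro buf pend hp hb hne
    simp only [etagConsume, List.isEmpty_iff, hne, if_false]
    by_cases hc : PySem.Chars.isspace c
    · rw [if_pos hc, ih buf (pend ++ [c])
        (by intro d hd; rcases List.mem_append.mp hd with h | h
            · exact hp d h
            · simp at h; subst h; exact hc) hb hne]
      simp
    · rw [if_neg hc, ih (buf ++ pend ++ [c]) [] (by simp)
        (etag_rstrip_append_nonspace (buf ++ pend) c hc) (by simp)]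
      simp

theorem etagConsume_nil (cs : List Char) : etagConsume [] [] cs = PySem.Chars.strip cs := by
  induction cs with
  | nil => simp [etagConsume, PySem.Chars.strip, PySem.Chars.lstrip, PySem.Chars.rstrip]
  | cons c rest ih =>
    by_cases hc : PySem.Chars.isspace c
    · simpa [etagConsume, hc, PySem.Chars.strip, PySem.Chars.lstrip] using ih
    · rw [show etagConsume [] [] (c :: rest) = etagConsume [c] [] rest by simp [etagConsume, hc]]
      rw [etagConsume_rstrip rest [c] [] (by simp) (by simp [PySem.Chars.rstrip, hc]) (by simp)]
      simp [PySem.Chars.strip, PySem.Chars.lstrip, hc]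

theorem etagScan_spec (t1 t2 t3 : List Char) (cs : List Char) : ∀ (buf pend : List Char),
    etagScan t1 t2 t3 buf pend cs =
      (etagHit t1 t2 t3 (etagConsume buf pend (etagTokens cs).headI)
        || (etagTokens cs).tail.any (fun tok => etagHit t1 t2 t3 (etagConsume [] [] tok))) := by
  induction cs with
  | nil => intro buf pend; simp [etagScan, etagTokens, etagConsume, etagHit]
  | cons c rest ih =>
    intro buf pend
    obtain ⟨h0, t0, ht⟩ := List.exists_cons_of_ne_nil (etagTokens_ne_nil rest)
    by_cases hc : c = ','
    · subst hc
      have hL : etagScan t1 t2 t3 buf pend (',' :: rest)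
          = (etagHit t1 t2 t3 buf || etagScan t1 t2 t3 [] [] rest) := by
        simp only [etagScan, etagHit]
        by_cases hhit : (buf == t1 || buf == t2 || buf == t3) = true
        · simp [hhit]
        · simp only [Bool.not_eq_true] at hhit; simp [hhit]
      rw [hL, ih [] [], show etagTokens (',' :: rest) = [] :: etagTokens rest by simp [etagTokens]]
      simp only [List.headI_cons, List.tail_cons, ht, List.any_cons]
      simp [etagConsume]
    · rw [show etagTokens (c :: rest) = (c :: h0) :: t0 by simp [etagTokens, hc, ht]]
      simp only [List.headI_cons, List.tail_cons]
      by_cases hs : PySem.Chars.isspace c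
      · by_cases hb : buf = []
        · subst hb
          rw [show etagScan t1 t2 t3 [] pend (c :: rest) = etagScan t1 t2 t3 [] pend rest by
                simp [etagScan, hc, hs]]
          rw [ih [] pend, ht]
          simp [etagConsume, hs]
        · rw [show etagScan t1 t2 t3 buf pend (c :: rest) = etagScan t1 t2 t3 buf (pend ++ [c]) rest by
                simp [etagScan, hc, hs, hb]]
          rw [ih buf (pend ++ [c]), ht]
          simp [etagConsume, hs, hb]
      · rw [show etagScan t1 t2 t3 buf pend (c :: rest) = etagScan t1 t2 t3 (buf ++ pend ++ [c]) [] rest by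
              simp [etagScan, hc, hs]]
        rw [ih (buf ++ pend ++ [c]) [], ht]
        simp [etagConsume, hs]

theorem etag_beq_ofList (l : List Char) (x : String) :
    (x == PySem.Str.strip (String.ofList l)) = (PySem.Chars.strip l == x.toList) := by
  rw [Bool.eq_iff_iff, beq_iff_eq, beq_iff_eq]
  constructor
  · intro h; rw [h]; simp
  · intro h; apply String.toList_inj.mp; simp [h]

theorem etag_contains_eq_any (ts : List (List Char)) (x : String) :
    ((ts.map (fun l => PySem.Str.strip (String.ofList l))).contains x)
      = ts.any (fun tok => PySem.Chars.strip tok == x.toList) := by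
  induction ts with
  | nil => simp
  | cons h t ih => simp only [List.map_cons, List.contains_cons, List.any_cons, ih, etag_beq_ofList]

theorem etag_any_or (ts : List (List Char)) (p q : List Char → Bool) :
    ts.any (fun x => p x || q x) = (ts.any p || ts.any q) := by
  induction ts with
  | nil => simp
  | cons h t ih =>
    simp only [List.any_cons, ih]
    cases p h <;> cases q h <;> simp [Bool.or_comm]

theorem etag_any_hit (ts : List (List Char)) (t1 t2 t3 : List Char) :
    ts.any (fun tok => etagHit t1 t2 t3 (PySem.Chars.strip tok))
      = (ts.any (fun tok => PySem.Chars.strip tok == t1)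
        || ts.any (fun tok => PySem.Chars.strip tok == t2)
        || ts.any (fun tok => PySem.Chars.strip tok == t3)) := by
  simp only [etagHit, etag_any_or, Bool.or_assoc]

-- ===== VERDICT (by name: the statement is the Claim_ definition above) =====
theorem etag_matches_py_spec : Claim_equal_etag_matches_py := by
  intro inm etag _
  unfold Spec_etag_matches_py etag_matches_py etag_matches_py_alt
  cases inm with
  | none => rfl
  | some s =>
    by_cases hs : s = ""
    · simp [hs]
    · simp only [hs, if_false]
      obtain ⟨h0, t0, ht⟩ := List.exists_cons_of_ne_nil (etagTokens_ne_nil s.toList)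
      have hB : etagScan ("*" : String).toList etag.toList
            (PySem.Str.replace etag "W/" "").toList [] [] s.toList
          = (etagTokens s.toList).any (fun tok =>
              etagHit ("*" : String).toList etag.toList (PySem.Str.replace etag "W/" "").toList
                (PySem.Chars.strip tok)) := by
        rw [etagScan_spec, ht]
        simp only [List.headI_cons, List.tail_cons, etagConsume_nil, List.any_cons]
      rw [hB, etag_any_hit]
      have hsplit : ((PySem.Str.split? s ",").getD []).map PySem.Str.strip
          = (etagTokens s.toList).map (fun l => PySem.Str.strip (String.ofList l)) := by
        simp [PySem.Str.split?, PySem.Chars.split?, etag_splitOn_eq_tokens, Function.comp]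
      rw [hsplit]
      simp only [etag_contains_eq_any]
      by_cases hstar : ((etagTokens s.toList).any
          (fun tok => PySem.Chars.strip tok == ("*" : String).toList)) = true
      · rw [if_pos hstar, hstar]; simp
      · rw [if_neg (by simpa using hstar), Bool.eq_false_iff.mpr hstar]
        simp
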